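-- pv_equiv track=rewrite | github.com/Rahal-Kanishka/practise-datastructures | data-structures/class-questions.py | place_queen_in_chessboard
-- ===== SOURCE A (Python) =====
-- def place_queen_in_chessboard(matrix):
--     colum_dic = {}  # keep track of columns used
--     count = 0
--     position_array = []
--     # count += 1
--     # colum_dic[0] = 0
--     # first piece placed
--     i = 0
--     j = 0
--     # last row shouldn't have a queen, since all position are already occupied
--     while i < len(matrix) - 1:
--         while j < len(matrix):
--             if j not in colum_dic.keys():
--                 position_array.append([i, j])
--                 colum_dic[j] = j
--                 count += 1
--                 if j + 2 >= len(matrix):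
--                     j = 0
--                 elif j + 2 < len(matrix):
--                     j += 2
--                 # since no queen can go in the same row
--                 break
--             else:
--                 j += 1
--         i += 1
--     return position_array, count
-- ===== SOURCE B (Python) =====
-- def place_queen_in_chessboard(matrix):
--     n = len(matrix)
--     cols = list(range(0, n, 2)) + list(range(1, n, 2))
--     position_array = [[i, c] for i, c in enumerate(cols[:n - 1])]
--     return position_array, len(position_array)
-- ===== Notes on version B (the rewrite author's own statement) =====
-- stated objective: simpler
-- what changed: Replaced the stateful nested-while jumping-column scan with a dict of used columns by a direct closed-form construction: the emitted columns are exactly the even columns ascending followed by the odd columns ascending, truncated to n-1 rows.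
import Mathlib
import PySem

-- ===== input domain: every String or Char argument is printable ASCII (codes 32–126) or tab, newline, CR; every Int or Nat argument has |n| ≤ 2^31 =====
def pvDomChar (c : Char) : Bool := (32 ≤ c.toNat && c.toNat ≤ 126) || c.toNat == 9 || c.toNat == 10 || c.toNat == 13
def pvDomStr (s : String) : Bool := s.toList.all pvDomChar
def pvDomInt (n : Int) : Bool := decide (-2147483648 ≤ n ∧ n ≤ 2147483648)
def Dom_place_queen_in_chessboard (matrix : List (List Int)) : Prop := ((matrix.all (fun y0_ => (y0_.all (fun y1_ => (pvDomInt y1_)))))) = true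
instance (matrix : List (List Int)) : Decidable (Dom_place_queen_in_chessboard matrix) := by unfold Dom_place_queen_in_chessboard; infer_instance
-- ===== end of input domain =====

-- B replaces A's stateful jumping-column scan (nested whiles + a dict of used columns) by the
-- closed-form construction: columns are the evens ascending then the odds ascending, truncated
-- to n-1 rows (objective: simpler).

-- ===== PORT A =====
-- inner 'while j < len(matrix)' loop of A (state: colum_dic, count, position_array, j)
def pqInner (n : Int) (dic : PySem.Dict Int Int) (count : Int) (pos : List (List Int)) (i j : Int) :
    PySem.Dict Int Int × Int × List (List Int) × Int :=
  if _h : j < n then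
    if dic.contains j = false then
      (dic.insert j j, count + 1, pos ++ [[i, j]], if j + 2 ≥ n then 0 else j + 2)
    else
      pqInner n dic count pos i (j + 1)
  else (dic, count, pos, j)
termination_by (n - j).toNat
decreasing_by exact (Int.toNat_lt_toNat (Int.sub_pos.mpr _h)).mpr (sub_lt_sub_left (lt_add_one j) n)

-- outer 'while i < len(matrix) - 1' loop of A
def pqOuter (n : Int) (dic : PySem.Dict Int Int) (count : Int) (pos : List (List Int)) (i j : Int) :
    List (List Int) × Int :=
  if _h : i < n - 1 then
    let r := pqInner n dic count pos i j
    pqOuter n r.1 r.2.1 r.2.2.1 (i + 1) r.2.2.2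
  else (pos, count)
termination_by (n - 1 - i).toNat
decreasing_by exact (Int.toNat_lt_toNat (Int.sub_pos.mpr _h)).mpr (sub_lt_sub_left (lt_add_one i) (n - 1))

def place_queen_in_chessboard (matrix : List (List Int)) : List (List Int) × Int :=
  pqOuter (matrix.length : Int) PySem.Dict.empty 0 [] 0 0

-- ===== PORT B =====
def place_queen_in_chessboard_alt (matrix : List (List Int)) : List (List Int) × Int :=
  let n : Int := (matrix.length : Int)
  let cols : List Int := PySem.List.pyRange 0 n 2 ++ PySem.List.pyRange 1 n 2
  let position_array : List (List Int) :=
    (PySem.List.enumerate (PySem.List.slice cols none (some (n - 1)))).map (fun p => [p.1, p.2])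
  (position_array, (position_array.length : Int))

-- ===== PRECONDITION & SPEC =====
def Spec_place_queen_in_chessboard (matrix : List (List Int)) (out : List (List Int) × Int) : Prop := out = place_queen_in_chessboard_alt matrix
instance (matrix : List (List Int)) (out : List (List Int) × Int) : Decidable (Spec_place_queen_in_chessboard matrix out) := by unfold Spec_place_queen_in_chessboard; infer_instance

-- ===== CLAIM (what is proved, stated in full; the proofs are below) =====
def Claim_equal_place_queen_in_chessboard : Prop := ∀ (matrix : List (List Int)), Dom_place_queen_in_chessboard matrix → Spec_place_queen_in_chessboard matrix (place_queen_in_chessboard matrix)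

-- ===== LEMMAS AND PROOFS =====

-- column placed in row m, for a board of size N with E = (N+1)/2 even columns
def colIdx (E m : Nat) : Int := if m < E then 2 * (m : Int) else 2 * ((m : Int) - (E : Int)) + 1

def posSpec (E k : Nat) : List (List Int) := (List.range k).map (fun (m : Nat) => [(m : Int), colIdx E m])

-- the dict after the first k (even-column) placements
def evDict : Nat → PySem.Dict Int Int
  | 0 => PySem.Dict.empty
  | k + 1 => (evDict k).insert (2 * (k : Int)) (2 * (k : Int))

-- the dict after all E even placements and o odd placements
def fDict (E : Nat) : Nat → PySem.Dict Int Int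
  | 0 => evDict E
  | o + 1 => (fDict E o).insert (2 * (o : Int) + 1) (2 * (o : Int) + 1)

theorem contains_evDict (k : Nat) (x : Int) :
    (evDict k).contains x = true ↔ ∃ m : Nat, m < k ∧ x = 2 * (m : Int) := by
  induction k with
  | zero => simp [evDict]
  | succ k ih =>
    rw [evDict, PySem.Dict.contains_insert]
    simp only [Bool.or_eq_true, beq_iff_eq, ih]
    constructor
    · rintro (rfl | ⟨m, hm, rfl⟩)
      · exact ⟨k, by omega, rfl⟩
      · exact ⟨m, by omega, rfl⟩
    · rintro ⟨m, hm, rfl⟩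
      rcases Nat.lt_succ_iff_lt_or_eq.mp hm with h | rfl
      · exact Or.inr ⟨m, h, rfl⟩
      · exact Or.inl rfl

theorem contains_fDict (E o : Nat) (x : Int) :
    (fDict E o).contains x = true ↔
      (∃ m : Nat, m < E ∧ x = 2 * (m : Int)) ∨ (∃ m : Nat, m < o ∧ x = 2 * (m : Int) + 1) := by
  induction o with
  | zero => simp [fDict, contains_evDict]
  | succ o ih =>
    rw [fDict, PySem.Dict.contains_insert]
    simp only [Bool.or_eq_true, beq_iff_eq, ih]
    constructor
    · rintro (rfl | ⟨m, hm, rfl⟩ | ⟨m, hm, rfl⟩)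
      · exact Or.inr ⟨o, by omega, rfl⟩
      · exact Or.inl ⟨m, hm, rfl⟩
      · exact Or.inr ⟨m, by omega, rfl⟩
    · rintro (⟨m, hm, rfl⟩ | ⟨m, hm, rfl⟩)
      · exact Or.inr (Or.inl ⟨m, hm, rfl⟩)
      · rcases Nat.lt_succ_iff_lt_or_eq.mp hm with h | rfl
        · exact Or.inr (Or.inr ⟨m, h, rfl⟩)
        · exact Or.inl rfl

theorem pqInner_hit (n : Int) (dic : PySem.Dict Int Int) (count : Int) (pos : List (List Int))
    (i j : Int) (hj : j < n) (hc : dic.contains j = false) :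
    pqInner n dic count pos i j =
      (dic.insert j j, count + 1, pos ++ [[i, j]], if j + 2 ≥ n then 0 else j + 2) := by
  rw [pqInner]; simp [hj, hc]

theorem pqInner_skip (n : Int) (dic : PySem.Dict Int Int) (count : Int) (pos : List (List Int))
    (i j : Int) (hj : j < n) (hc : dic.contains j = true) :
    pqInner n dic count pos i j = pqInner n dic count pos i (j + 1) := by
  rw [pqInner]; simp [hj, hc]

theorem pqOuter_stop (n : Int) (dic : PySem.Dict Int Int) (count : Int) (pos : List (List Int))
    (i j : Int) (h : ¬ i < n - 1) :
    pqOuter n dic count pos i j = (pos, count) := by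
  rw [pqOuter]; simp [h]

theorem pqOuter_step (n : Int) (dic : PySem.Dict Int Int) (count : Int) (pos : List (List Int))
    (i j : Int) (h : i < n - 1) :
    pqOuter n dic count pos i j =
      pqOuter n (pqInner n dic count pos i j).1 (pqInner n dic count pos i j).2.1
        (pqInner n dic count pos i j).2.2.1 (i + 1) (pqInner n dic count pos i j).2.2.2 := by
  rw [pqOuter]; simp [h]

theorem posSpec_succ (E k : Nat) :
    posSpec E (k + 1) = posSpec E k ++ [[(k : Int), colIdx E k]] := by
  simp [posSpec, List.range_succ]

-- phase 2: the odd columns are emitted in order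
theorem phase2 (N E : Nat) (hE : E = (N + 1) / 2) (hN : 2 ≤ N) :
    ∀ d i o : Nat, i + d = N - 1 → o = i - E → E ≤ i → i ≤ N - 1 →
    ∀ j : Int, ((i : Int) < (N : Int) - 1 → j = 2 * (o : Int) + 1) →
    pqOuter (N : Int) (fDict E o) (i : Int) (posSpec E i) (i : Int) j =
      (posSpec E (N - 1), ((N - 1 : Nat) : Int)) := by
  intro d
  induction d with
  | zero =>
    intro i o hd ho hEi hiN j hj
    rw [pqOuter_stop _ _ _ _ _ _ (by omega)]
    have hi : i = N - 1 := by omega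
    subst hi
    rfl
  | succ d ih =>
    intro i o hd ho hEi hiN j hj
    have hlt : (i : Int) < (N : Int) - 1 := by omega
    obtain rfl := hj hlt
    have hjN : 2 * (o : Int) + 1 < (N : Int) := by omega
    have hcont : (fDict E o).contains (2 * (o : Int) + 1) = false := by
      rw [Bool.eq_false_iff]
      intro h
      rcases (contains_fDict E o _).mp h with ⟨m, hm, he⟩ | ⟨m, hm, he⟩ <;> omega
    rw [pqOuter_step _ _ _ _ _ _ hlt, pqInner_hit _ _ _ _ _ _ hjN hcont]
    have e1 : (fDict E o).insert (2 * (o : Int) + 1) (2 * (o : Int) + 1) = fDict E (o + 1) := rfl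
    have e2 : posSpec E i ++ [[(i : Int), 2 * (o : Int) + 1]] = posSpec E (i + 1) := by
      have hcol : colIdx E i = 2 * (o : Int) + 1 := by
        rw [colIdx, if_neg (by omega)]; omega
      rw [posSpec_succ, hcol]
    have e3 : ((i : Int)) + 1 = (((i + 1 : Nat)) : Int) := by push_cast; ring
    simp only [e1, e2, e3]
    exact ih (i + 1) (o + 1) (by omega) (by omega) (by omega) (by omega) _
      (fun h => by rw [if_neg (by omega)]; push_cast; ring)

-- phase 1: the even columns are emitted in order, then the scan wraps to column 0
theorem phase1 (N E : Nat) (hE : E = (N + 1) / 2) (hN : 2 ≤ N) :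
    ∀ d i : Nat, i + d = E → i ≤ E →
    pqOuter (N : Int) (evDict i) (i : Int) (posSpec E i) (i : Int)
        (if i < E then 2 * (i : Int) else 0) =
      (posSpec E (N - 1), ((N - 1 : Nat) : Int)) := by
  intro d
  induction d with
  | zero =>
    intro i hd _
    have hi : i = E := by omega
    rw [if_neg (by omega)]
    by_cases hstop : (i : Int) < (N : Int) - 1
    · rw [pqOuter_step _ _ _ _ _ _ hstop]
      have h0 : (evDict i).contains 0 = true :=
        (contains_evDict i 0).mpr ⟨0, by omega, by simp⟩
      rw [pqInner_skip _ _ _ _ _ _ (by omega) h0]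
      have h1 : (evDict i).contains (0 + 1) = false := by
        rw [Bool.eq_false_iff]
        intro h
        rcases (contains_evDict i _).mp h with ⟨m, hm, he⟩
        omega
      rw [pqInner_hit _ _ _ _ _ _ (by omega) h1]
      have e1 : (evDict i).insert (0 + 1) (0 + 1) = fDict E 1 := by
        rw [hi]
        show _ = (fDict E 0).insert (2 * ((0 : Nat) : Int) + 1) (2 * ((0 : Nat) : Int) + 1)
        norm_num [fDict]
      have e2 : posSpec E i ++ [[(i : Int), 0 + 1]] = posSpec E (i + 1) := by
        have hcol : colIdx E i = 0 + 1 := by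
          rw [colIdx, if_neg (by omega)]; omega
        rw [posSpec_succ, hcol]
      have e3 : ((i : Int)) + 1 = (((i + 1 : Nat)) : Int) := by push_cast; ring
      simp only [e1, e2, e3]
      exact phase2 N E hE hN (N - 1 - (i + 1)) (i + 1) 1 (by omega) (by omega) (by omega)
        (by omega) _ (fun h => by rw [if_neg (by omega)]; norm_num)
    · rw [pqOuter_stop _ _ _ _ _ _ hstop]
      have hEN : i = N - 1 := by omega
      subst hEN
      rfl
  | succ d ih =>
    intro i hd _
    have hiE : i < E := by omega
    rw [if_pos hiE]
    have hlt : (i : Int) < (N : Int) - 1 := by omega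
    have hc : (evDict i).contains (2 * (i : Int)) = false := by
      rw [Bool.eq_false_iff]
      intro h
      rcases (contains_evDict i _).mp h with ⟨m, hm, he⟩
      omega
    rw [pqOuter_step _ _ _ _ _ _ hlt, pqInner_hit _ _ _ _ _ _ (by omega) hc]
    have e1 : (evDict i).insert (2 * (i : Int)) (2 * (i : Int)) = evDict (i + 1) := rfl
    have e2 : posSpec E i ++ [[(i : Int), 2 * (i : Int)]] = posSpec E (i + 1) := by
      have hcol : colIdx E i = 2 * (i : Int) := by rw [colIdx, if_pos hiE]
      rw [posSpec_succ, hcol]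
    have e3 : ((i : Int)) + 1 = (((i + 1 : Nat)) : Int) := by push_cast; ring
    have e4 : (if 2 * (i : Int) + 2 ≥ (N : Int) then 0 else 2 * (i : Int) + 2) =
        (if i + 1 < E then 2 * (((i + 1 : Nat)) : Int) else 0) := by
      by_cases h2 : i + 1 < E
      · rw [if_neg (by omega), if_pos h2]; push_cast; ring
      · rw [if_pos (by omega), if_neg h2]
    simp only [e1, e2, e3, e4]
    exact ih (i + 1) (by omega) (by omega)

theorem A_closed (matrix : List (List Int)) :
    place_queen_in_chessboard matrix =
      (posSpec ((matrix.length + 1) / 2) (matrix.length - 1), ((matrix.length - 1 : Nat) : Int)) := by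
  by_cases hN : 2 ≤ matrix.length
  · have h := phase1 matrix.length ((matrix.length + 1) / 2) rfl hN ((matrix.length + 1) / 2) 0
      (by omega) (by omega)
    have hj : (if 0 < (matrix.length + 1) / 2 then 2 * ((0 : Nat) : Int) else 0) = 0 := by
      split <;> norm_num
    rw [hj] at h
    simpa [place_queen_in_chessboard, evDict, posSpec] using h
  · rw [place_queen_in_chessboard, pqOuter_stop _ _ _ _ _ _ (by omega)]
    have h1 : matrix.length - 1 = 0 := by omega
    rw [h1]
    simp [posSpec]

theorem enumerate_map_range (k : Nat) (f : Nat → Int) (s : Int) :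
    PySem.List.enumerate ((List.range k).map f) s =
      (List.range k).map (fun (m : Nat) => (s + (m : Int), f m)) := by
  induction k generalizing f s with
  | zero => simp
  | succ k ih =>
    rw [List.range_succ_eq_map]
    simp only [List.map_cons, List.map_map, PySem.List.enumerate_cons]
    rw [ih (f ∘ Nat.succ) (s + 1)]
    congr 1
    · norm_num
    · apply List.map_congr_left
      intro m _
      simp only [Function.comp_apply, Nat.succ_eq_add_one]
      rw [Prod.mk.injEq]
      exact ⟨by push_cast; ring, rfl⟩


theorem cols_eq (N : Nat) :
    (List.range ((N + 1) / 2)).map (fun (m : Nat) => (2 * (m : Int))) ++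
      (List.range (N / 2)).map (fun (m : Nat) => (2 * (m : Int) + 1)) =
      (List.range N).map (colIdx ((N + 1) / 2)) := by
  have h : List.range N =
      List.range ((N + 1) / 2) ++ (List.range (N / 2)).map (fun x => (N + 1) / 2 + x) := by
    rw [← List.range_add]
    congr 1
    omega
  rw [h, List.map_append, List.map_map]
  congr 1
  · apply List.map_congr_left
    intro m hm
    rw [List.mem_range] at hm
    rw [colIdx, if_pos hm]
  · apply List.map_congr_left
    intro m _
    simp only [Function.comp_apply]
    rw [colIdx, if_neg (by omega)]
    push_cast
    ring

theorem B_closed (matrix : List (List Int)) :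
    place_queen_in_chessboard_alt matrix =
      (posSpec ((matrix.length + 1) / 2) (matrix.length - 1), ((matrix.length - 1 : Nat) : Int)) := by
  by_cases h0 : matrix.length = 0
  · obtain rfl := List.length_eq_zero_iff.mp h0
    rfl
  · rw [place_queen_in_chessboard_alt]
    have r0 : PySem.List.pyRange 0 (matrix.length : Int) 2 =
        (List.range ((matrix.length + 1) / 2)).map (fun (m : Nat) => (2 * (m : Int))) := by
      rw [PySem.List.pyRange_of_pos 0 (matrix.length : Int) (by norm_num)]
      have he : (if (0 : Int) < (matrix.length : Int)
          then (((matrix.length : Int) - 0 + 2 - 1) / 2).toNat else 0) = (matrix.length + 1) / 2 := by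
        split <;> omega
      rw [he]
      apply List.map_congr_left
      intro m _
      ring
    have r1 : PySem.List.pyRange 1 (matrix.length : Int) 2 =
        (List.range (matrix.length / 2)).map (fun (m : Nat) => (2 * (m : Int) + 1)) := by
      rw [PySem.List.pyRange_of_pos 1 (matrix.length : Int) (by norm_num)]
      have he : (if (1 : Int) < (matrix.length : Int)
          then (((matrix.length : Int) - 1 + 2 - 1) / 2).toNat else 0) = matrix.length / 2 := by
        split <;> omega
      rw [he]
      apply List.map_congr_left
      intro m _
      ring
    rw [r0, r1, cols_eq]
    have hs : ((matrix.length : Int)) - 1 = (((matrix.length - 1 : Nat)) : Int) := by omega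
    rw [hs, PySem.List.slice_to_natCast, ← List.map_take, List.take_range,
      Nat.min_eq_left (by omega), enumerate_map_range, List.map_map]
    have hp : (List.range (matrix.length - 1)).map
        ((fun p : Int × Int => [p.1, p.2]) ∘ fun (m : Nat) => ((0 : Int) + (m : Int), colIdx ((matrix.length + 1) / 2) m)) =
        posSpec ((matrix.length + 1) / 2) (matrix.length - 1) := by
      apply List.map_congr_left
      intro m _
      simp
    rw [hp]
    simp [posSpec]

-- ===== VERDICT (by name: the statement is the Claim_ definition above) =====
theorem place_queen_in_chessboard_spec : Claim_equal_place_queen_in_chessboard := by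
  intro matrix _
  unfold Spec_place_queen_in_chessboard
  rw [A_closed, B_closed]
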